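-- pv_equiv track=rewrite | github.com/Smarangk13/Pacman-Ai | Map_Standard.py | numerical1d
-- ===== SOURCE A (Python) =====
-- def numerical1d(grid):
--     count = 0
--     items = {'W': 0, 'O': 1, 'T': 2, 'P': 3}  # Fixed nums for consistent training
--     grid1d = []
--     for row in grid:
--         for elem in row:
--             coded = 0
--             if elem in items:
--                 coded = items[elem]
--             else:
--                 items[elem] = count
--                 coded = count
--                 count += 1
--             grid1d.append(coded)
--     return grid1d
-- ===== SOURCE B (Python) =====
-- def numerical1d(grid):
--     # Three stages: flatten the grid, collect the novel symbols in
--     # first-occurrence order as a list, build the lookup table once from that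
--     # ordered list, then emit the result by pure lookups.
--     flat = [e for row in grid for e in row]
--     presets = {'W': 0, 'O': 1, 'T': 2, 'P': 3}
--     novel = []
--     for e in flat:
--         if e not in presets and e not in novel:
--             novel.append(e)
--     table = dict(presets)
--     for i, s in enumerate(novel):
--         table[s] = i
--     return [table[e] for e in flat]
-- ===== Notes on version B (the rewrite author's own statement) =====
-- stated objective: alternative
-- what changed: B replaces A's single stateful pass (dict grown while emitting, with a running counter) by three stages: flatten the grid, collect the ordered list of novel symbols by list membership, build the lookup table once by enumerating that list, and emit the flat result by pure lookups.
import Mathlib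
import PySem

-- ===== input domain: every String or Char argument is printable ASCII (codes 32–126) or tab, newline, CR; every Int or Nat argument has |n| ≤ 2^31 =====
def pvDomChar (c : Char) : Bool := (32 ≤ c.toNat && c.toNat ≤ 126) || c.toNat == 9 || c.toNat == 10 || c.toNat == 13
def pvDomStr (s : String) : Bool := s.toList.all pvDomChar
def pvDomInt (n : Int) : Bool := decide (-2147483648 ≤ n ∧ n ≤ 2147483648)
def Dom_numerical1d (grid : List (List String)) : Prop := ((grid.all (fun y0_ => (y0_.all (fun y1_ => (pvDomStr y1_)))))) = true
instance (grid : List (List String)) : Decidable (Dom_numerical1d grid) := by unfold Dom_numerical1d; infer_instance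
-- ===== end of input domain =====

-- B replaces A's single stateful pass by three stages: flatten, collect the
-- novel symbols into an ordered list, build the table once by enumeration,
-- then emit by pure lookups (objective: alternative decomposition).

-- the preset table {'W':0,'O':1,'T':2,'P':3} used by both Pythons
def pvPresetD : PySem.Dict String Int :=
  PySem.Dict.ofList [("W", (0:Int)), ("O", 1), ("T", 2), ("P", 3)]

-- ===== PORT A =====
-- loop body of A: state = (count, items, grid1d); 'coded = 0' is only read when
-- 'elem in items', so the guarded 'items[elem]' is exactly 'items.getD elem 0'
def pvStepA (s : Int × PySem.Dict String Int × List Int) (elem : String) :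
    Int × PySem.Dict String Int × List Int :=
  if s.2.1.contains elem then
    (s.1, s.2.1, s.2.2 ++ [s.2.1.getD elem 0])
  else
    (s.1 + 1, s.2.1.insert elem s.1, s.2.2 ++ [s.1])

def numerical1d (grid : List (List String)) : List Int :=
  (grid.foldl (fun s row => row.foldl pvStepA s)
    ((0 : Int), pvPresetD, ([] : List Int))).2.2

-- ===== PORT B =====
-- stage 2: 'if e not in presets and e not in novel: novel.append(e)'
def pvNovelStep (acc : List String) (e : String) : List String :=
  if !(pvPresetD.contains e) && !(acc.contains e) then acc ++ [e] else acc

-- stage 3: 'table = dict(presets); for i, s in enumerate(novel): table[s] = i'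
-- (the enumerate counter is the second component)
def pvTbl (novel : List String) : PySem.Dict String Int × Int :=
  novel.foldl (fun p s => (p.1.insert s p.2, p.2 + 1)) (pvPresetD, (0 : Int))

def numerical1d_alt (grid : List (List String)) : List Int :=
  let flat := grid.flatMap (fun row => row)      -- [e for row in grid for e in row]
  let novel := flat.foldl pvNovelStep []
  let table := (pvTbl novel).1
  flat.map (fun e => table.getD e 0)             -- every e is a key, so getD _ 0 is exact

-- ===== PRECONDITION & SPEC =====
def Spec_numerical1d (grid : List (List String)) (out : List Int) : Prop := out = numerical1d_alt grid
instance (grid : List (List String)) (out : List Int) : Decidable (Spec_numerical1d grid out) := by unfold Spec_numerical1d; infer_instance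

-- ===== CLAIM (what is proved, stated in full; the proofs are below) =====
def Claim_equal_numerical1d : Prop := ∀ (grid : List (List String)), Dom_numerical1d grid → Spec_numerical1d grid (numerical1d grid)

-- ===== LEMMAS AND PROOFS =====

-- proof-only helper: A's dict/count evolution with the emission stripped off
def pvStepB (s : Int × PySem.Dict String Int) (elem : String) :
    Int × PySem.Dict String Int :=
  if s.2.contains elem then s else (s.1 + 1, s.2.insert elem s.1)

-- the nested row/elem loops are the loop over the flattened grid
theorem pv_foldl_nested {σ : Type} (f : σ → String → σ) :
    ∀ (grid : List (List String)) (s : σ),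
      grid.foldl (fun s row => row.foldl f s) s = (grid.flatMap (fun row => row)).foldl f s := by
  intro grid
  induction grid with
  | nil => intro s; rfl
  | cons r gs ih => intro s; simp [List.foldl_append, ih]

-- the stripped loop never overwrites an existing binding
theorem pv_build_preserves :
    ∀ (xs : List String) (c : Int) (d : PySem.Dict String Int) (k : String) (v : Int),
      d.get? k = some v → ((xs.foldl pvStepB (c, d)).2).get? k = some v := by
  intro xs
  induction xs with
  | nil => intro c d k v h; exact h
  | cons e rest ih =>
    intro c d k v h
    by_cases hc : d.contains e = true
    · simpa [List.foldl_cons, pvStepB, hc] using ih c d k v h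
    · have hne : k ≠ e := by
        intro he; subst he
        rw [PySem.Dict.contains_eq_isSome_get?, h] at hc
        simp at hc
      simp only [List.foldl_cons, pvStepB, hc, Bool.false_eq_true, if_false]
      exact ih (c + 1) (d.insert e c) k v (by rw [PySem.Dict.get?_insert_of_ne d c hne]; exact h)

-- A's combined loop = the stripped loop plus lookups in the FINAL table
theorem pv_loop_split :
    ∀ (xs : List String) (c : Int) (d : PySem.Dict String Int) (acc : List Int),
      xs.foldl pvStepA (c, d, acc) =
        ((xs.foldl pvStepB (c, d)).1, (xs.foldl pvStepB (c, d)).2,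
          acc ++ xs.map (fun e => (xs.foldl pvStepB (c, d)).2.getD e 0)) := by
  intro xs
  induction xs with
  | nil => intro c d acc; simp
  | cons e rest ih =>
    intro c d acc
    by_cases hc : d.contains e = true
    · have hv : ∃ v, d.get? e = some v := by
        rw [PySem.Dict.contains_eq_isSome_get?] at hc
        exact Option.isSome_iff_exists.mp hc
      obtain ⟨v, hv⟩ := hv
      have hfin := pv_build_preserves rest c d e v hv
      simp only [List.foldl_cons, pvStepA, pvStepB, hc, if_true, List.map_cons]
      rw [ih c d (acc ++ [d.getD e 0])]
      have h1 : d.getD e 0 = v := PySem.Dict.getD_of_get?_eq_some d 0 hv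
      have h2 : ((rest.foldl pvStepB (c, d)).2).getD e 0 = v :=
        PySem.Dict.getD_of_get?_eq_some _ 0 hfin
      simp [h1, h2]
    · have hfin := pv_build_preserves rest (c + 1) (d.insert e c) e c
        (PySem.Dict.get?_insert_self d e c)
      simp only [List.foldl_cons, pvStepA, pvStepB, hc, Bool.false_eq_true, if_false,
        List.map_cons]
      rw [ih (c + 1) (d.insert e c) (acc ++ [c])]
      have h2 : ((rest.foldl pvStepB (c + 1, d.insert e c)).2).getD e 0 = c :=
        PySem.Dict.getD_of_get?_eq_some _ 0 hfin
      simp [h2]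

-- B's staged novel-list + enumerate-fold rebuilds exactly the stripped loop's state
theorem pv_inv :
    ∀ (xs : List String) (n : List String) (d : PySem.Dict String Int) (c : Int),
      pvTbl n = (d, c) →
      (∀ e, d.contains e = (pvPresetD.contains e || n.contains e)) →
      pvTbl (xs.foldl pvNovelStep n) =
        ((xs.foldl pvStepB (c, d)).2, (xs.foldl pvStepB (c, d)).1) := by
  intro xs
  induction xs with
  | nil => intro n d c h _; simpa using h
  | cons e rest ih =>
    intro n d c h hcont
    by_cases hc : d.contains e = true
    · have hn : (pvPresetD.contains e || n.contains e) = true := by rw [← hcont]; exact hc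
      have hcond : pvNovelStep n e = n := by
        rcases Bool.or_eq_true_iff.mp hn with hp | hm
        · simp [pvNovelStep, hp]
        · simp [pvNovelStep, List.contains_iff_mem.mp hm]
      simp only [List.foldl_cons, pvStepB, hc, if_true, hcond]
      exact ih n d c h hcont
    · have hn : (pvPresetD.contains e || n.contains e) = false := by
        rw [← hcont]; exact (Bool.not_eq_true _).mp hc
      have hp : pvPresetD.contains e = false := by
        cases hpe : pvPresetD.contains e <;> simp [hpe] at hn ⊢
      have hm : n.contains e = false := by
        cases hme : n.contains e <;> simp_all
      simp only [List.foldl_cons, pvNovelStep, pvStepB, hc, hp, hm, Bool.not_false,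
        Bool.and_self, if_true, Bool.false_eq_true, if_false]
      have htbl : pvTbl (n ++ [e]) = (d.insert e c, c + 1) := by
        unfold pvTbl at h ⊢
        rw [List.foldl_append, h]
        rfl
      refine ih (n ++ [e]) (d.insert e c) (c + 1) htbl ?_
      intro x
      rw [PySem.Dict.contains_insert, hcont x]
      cases hx : (x == e) <;> cases hxp : pvPresetD.contains x <;>
        cases hnx : n.contains x <;> simp_all

-- ===== VERDICT (by name: the statement is the Claim_ definition above) =====
theorem numerical1d_spec : Claim_equal_numerical1d := by
  intro grid _
  show numerical1d grid = numerical1d_alt grid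
  unfold numerical1d numerical1d_alt
  rw [pv_foldl_nested pvStepA, pv_loop_split]
  have h := pv_inv (grid.flatMap (fun row => row)) [] pvPresetD 0 rfl (by intro e; simp)
  simp only [List.nil_append]
  rw [h]
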